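-- pv_equiv track=rewrite | github.com/ericfitz/tmi | scripts/validate_openapi.py | analyze_endpoint_coverage
-- ===== SOURCE A (Python) =====
-- from typing import Dict, List, Tuple, Any, Set
--
-- def analyze_endpoint_coverage(spec: Dict[str, Any]) -> Dict[str, List[str]]:
--     """Analyze endpoint coverage by functional category."""
--     paths = spec.get("paths", {})
--
--     categories = {
--         "Root": [],
--         "Authentication": [],
--         "Threat Models": [],
--         "Diagrams": [],
--         "Threats": [],
--         "Documents": [],
--         "Sources": [],
--         "Metadata": [],
--         "Collaboration": [],
--         "Other": [],
--     }
--
--     for path in paths.keys():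
--         if path == "/":
--             categories["Root"].append(path)
--         elif path.startswith("/oauth2"):
--             categories["Authentication"].append(path)
--         elif path.startswith("/collaboration"):
--             categories["Collaboration"].append(path)
--         elif "/threats" in path:
--             categories["Threats"].append(path)
--         elif "/diagrams" in path:
--             categories["Diagrams"].append(path)
--         elif "/documents" in path:
--             categories["Documents"].append(path)
--         elif "/sources" in path:
--             categories["Sources"].append(path)
--         elif "/metadata" in path:
--             categories["Metadata"].append(path)
--         elif path.startswith("/threat_models"):
--             categories["Threat Models"].append(path)
--         else:
--             categories["Other"].append(path)
--
--     # Remove empty categories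
--     return {k: v for k, v in categories.items() if v}
-- ===== SOURCE B (Python) =====
-- CATEGORY_ORDER = ["Root", "Authentication", "Threat Models", "Diagrams", "Threats",
--                   "Documents", "Sources", "Metadata", "Collaboration", "Other"]
--
-- def _category(path):
--     if path == "/":
--         return "Root"
--     if path.startswith("/oauth2"):
--         return "Authentication"
--     if path.startswith("/collaboration"):
--         return "Collaboration"
--     if "/threats" in path:
--         return "Threats"
--     if "/diagrams" in path:
--         return "Diagrams"
--     if "/documents" in path:
--         return "Documents"
--     if "/sources" in path:
--         return "Sources"
--     if "/metadata" in path: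
--         return "Metadata"
--     if path.startswith("/threat_models"):
--         return "Threat Models"
--     return "Other"
--
-- def analyze_endpoint_coverage(spec):
--     """Analyze endpoint coverage by functional category."""
--     paths = list(spec.get("paths", {}))
--     grouped = {c: [p for p in paths if _category(p) == c] for c in CATEGORY_ORDER}
--     return {c: v for c, v in grouped.items() if v}
-- ===== Notes on version B (the rewrite author's own statement) =====
-- stated objective: simpler
-- what changed: Replaced the single pass that mutates a dict of category lists with a pure classifier function plus one per-category filter pass, building the grouping declaratively by dict comprehension.
import Mathlib
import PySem

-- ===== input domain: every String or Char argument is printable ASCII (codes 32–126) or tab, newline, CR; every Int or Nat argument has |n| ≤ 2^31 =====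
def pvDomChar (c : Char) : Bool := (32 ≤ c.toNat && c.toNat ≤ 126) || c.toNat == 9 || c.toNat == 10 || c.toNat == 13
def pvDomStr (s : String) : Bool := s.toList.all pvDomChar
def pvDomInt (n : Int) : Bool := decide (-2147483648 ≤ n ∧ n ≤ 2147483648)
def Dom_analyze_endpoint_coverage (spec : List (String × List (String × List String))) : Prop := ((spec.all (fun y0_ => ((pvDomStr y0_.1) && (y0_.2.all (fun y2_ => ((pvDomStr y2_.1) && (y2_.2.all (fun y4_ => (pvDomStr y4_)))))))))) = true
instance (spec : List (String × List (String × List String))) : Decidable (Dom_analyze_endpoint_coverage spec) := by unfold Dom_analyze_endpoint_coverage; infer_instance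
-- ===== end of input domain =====

-- B replaces A's single pass mutating a dict of category lists by a pure classifier
-- plus one filter pass per fixed category (simpler, declarative; same results).

-- ===== PORT A =====
-- the literal initial categories dict of A
def pvInitCats : PySem.Dict String (List String) :=
  ((((((((((PySem.Dict.empty.insert "Root" []).insert "Authentication" []).insert "Threat Models" []).insert "Diagrams" []).insert "Threats" []).insert "Documents" []).insert "Sources" []).insert "Metadata" []).insert "Collaboration" []).insert "Other" [])

def analyze_endpoint_coverage (spec : List (String × List (String × List String))) : List (String × List String) :=
  let paths := (PySem.Dict.mk spec).getD "paths" []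
  let cats := ((PySem.Dict.mk paths).keys).foldl (fun d path =>
      if path == "/" then d.modify "Root" [] (· ++ [path])
      else if PySem.Str.startswith path "/oauth2" then d.modify "Authentication" [] (· ++ [path])
      else if PySem.Str.startswith path "/collaboration" then d.modify "Collaboration" [] (· ++ [path])
      else if PySem.Str.isIn "/threats" path then d.modify "Threats" [] (· ++ [path])
      else if PySem.Str.isIn "/diagrams" path then d.modify "Diagrams" [] (· ++ [path])
      else if PySem.Str.isIn "/documents" path then d.modify "Documents" [] (· ++ [path])
      else if PySem.Str.isIn "/sources" path then d.modify "Sources" [] (· ++ [path])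
      else if PySem.Str.isIn "/metadata" path then d.modify "Metadata" [] (· ++ [path])
      else if PySem.Str.startswith path "/threat_models" then d.modify "Threat Models" [] (· ++ [path])
      else d.modify "Other" [] (· ++ [path])) pvInitCats
  cats.items.filter (fun kv => !kv.2.isEmpty)

-- ===== PORT B =====
def pvOrder : List String :=
  ["Root", "Authentication", "Threat Models", "Diagrams", "Threats",
   "Documents", "Sources", "Metadata", "Collaboration", "Other"]

def pvCategory (path : String) : String :=
  if path == "/" then "Root"
  else if PySem.Str.startswith path "/oauth2" then "Authentication"
  else if PySem.Str.startswith path "/collaboration" then "Collaboration"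
  else if PySem.Str.isIn "/threats" path then "Threats"
  else if PySem.Str.isIn "/diagrams" path then "Diagrams"
  else if PySem.Str.isIn "/documents" path then "Documents"
  else if PySem.Str.isIn "/sources" path then "Sources"
  else if PySem.Str.isIn "/metadata" path then "Metadata"
  else if PySem.Str.startswith path "/threat_models" then "Threat Models"
  else "Other"

def analyze_endpoint_coverage_alt (spec : List (String × List (String × List String))) : List (String × List String) :=
  let paths := (PySem.Dict.mk (PySem.Dict.mk spec |>.getD "paths" [])).keys
  let grouped := pvOrder.map (fun c => (c, paths.filter (fun p => pvCategory p == c)))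
  grouped.filter (fun kv => !kv.2.isEmpty)

-- ===== PRECONDITION & SPEC =====
def Spec_analyze_endpoint_coverage (spec : List (String × List (String × List String))) (out : List (String × List String)) : Prop := out = analyze_endpoint_coverage_alt spec
instance (spec : List (String × List (String × List String))) (out : List (String × List String)) : Decidable (Spec_analyze_endpoint_coverage spec out) := by unfold Spec_analyze_endpoint_coverage; infer_instance

-- ===== CLAIM (what is proved, stated in full; the proofs are below) =====
def Claim_equal_analyze_endpoint_coverage : Prop := ∀ (spec : List (String × List (String × List String))), Dom_analyze_endpoint_coverage spec → Spec_analyze_endpoint_coverage spec (analyze_endpoint_coverage spec)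

-- ===== LEMMAS AND PROOFS =====

-- A's if-chain body is exactly "modify at the classified category"
theorem pv_stepA_eq (d : PySem.Dict String (List String)) (path : String) :
    (if path == "/" then d.modify "Root" [] (· ++ [path])
      else if PySem.Str.startswith path "/oauth2" then d.modify "Authentication" [] (· ++ [path])
      else if PySem.Str.startswith path "/collaboration" then d.modify "Collaboration" [] (· ++ [path])
      else if PySem.Str.isIn "/threats" path then d.modify "Threats" [] (· ++ [path])
      else if PySem.Str.isIn "/diagrams" path then d.modify "Diagrams" [] (· ++ [path])
      else if PySem.Str.isIn "/documents" path then d.modify "Documents" [] (· ++ [path])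
      else if PySem.Str.isIn "/sources" path then d.modify "Sources" [] (· ++ [path])
      else if PySem.Str.isIn "/metadata" path then d.modify "Metadata" [] (· ++ [path])
      else if PySem.Str.startswith path "/threat_models" then d.modify "Threat Models" [] (· ++ [path])
      else d.modify "Other" [] (· ++ [path]))
    = d.modify (pvCategory path) [] (· ++ [path]) := by
  unfold pvCategory
  split_ifs <;> rfl

theorem pv_category_mem (path : String) : pvCategory path ∈ pvOrder := by
  unfold pvCategory pvOrder
  split_ifs <;> simp

theorem pv_init_keys : pvInitCats.keys = pvOrder := by decide

theorem pv_init_getD (c : String) : pvInitCats.getD c [] = [] := by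
  unfold pvInitCats
  simp [PySem.Dict.getD_insert]

theorem pv_loop_keys (l : List String) :
    (l.foldl (fun d path => d.modify (pvCategory path) [] (· ++ [path])) pvInitCats).keys = pvOrder := by
  rw [PySem.Dict.keys_foldl_modify_key, pv_init_keys,
      PySem.Set.update_eq_append_filter]
  have h : ((PySem.Set.ofList (l.map pvCategory)).filter (fun y => !(PySem.Set.contains pvOrder y))) = [] := by
    rw [List.filter_eq_nil_iff]
    intro y hy
    have hy' : y ∈ l.map pvCategory := (PySem.Set.mem_ofList _ _).1 hy
    obtain ⟨p, _, rfl⟩ := List.mem_map.1 hy'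
    simp [pv_category_mem]
  rw [h, List.append_nil]

theorem pv_loop_getD (l : List String) (c : String) :
    (l.foldl (fun d path => d.modify (pvCategory path) [] (· ++ [path])) pvInitCats).getD c []
      = l.filter (fun p => pvCategory p == c) := by
  have hmap : l.foldl (fun d path => d.modify (pvCategory path) [] (· ++ [path])) pvInitCats
      = (l.map (fun p => (pvCategory p, p))).foldl (fun d q => d.modify q.1 [] (· ++ [q.2])) pvInitCats := by
    rw [List.foldl_map]
  rw [hmap, PySem.Dict.getD_foldl_modify_append, pv_init_getD, List.nil_append,
      List.filter_map, List.map_map]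
  simp [Function.comp_def]

-- ===== VERDICT (by name: the statement is the Claim_ definition above) =====
theorem analyze_endpoint_coverage_spec : Claim_equal_analyze_endpoint_coverage := by
  intro spec _
  unfold Spec_analyze_endpoint_coverage analyze_endpoint_coverage analyze_endpoint_coverage_alt
  simp only
  set l := (PySem.Dict.mk ((PySem.Dict.mk spec).getD "paths" [])).keys with hl
  have hstep : (fun (d : PySem.Dict String (List String)) path =>
      if path == "/" then d.modify "Root" [] (· ++ [path])
      else if PySem.Str.startswith path "/oauth2" then d.modify "Authentication" [] (· ++ [path])
      else if PySem.Str.startswith path "/collaboration" then d.modify "Collaboration" [] (· ++ [path])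
      else if PySem.Str.isIn "/threats" path then d.modify "Threats" [] (· ++ [path])
      else if PySem.Str.isIn "/diagrams" path then d.modify "Diagrams" [] (· ++ [path])
      else if PySem.Str.isIn "/documents" path then d.modify "Documents" [] (· ++ [path])
      else if PySem.Str.isIn "/sources" path then d.modify "Sources" [] (· ++ [path])
      else if PySem.Str.isIn "/metadata" path then d.modify "Metadata" [] (· ++ [path])
      else if PySem.Str.startswith path "/threat_models" then d.modify "Threat Models" [] (· ++ [path])
      else d.modify "Other" [] (· ++ [path]))
      = (fun d path => d.modify (pvCategory path) [] (· ++ [path])) := by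
    funext d path; exact pv_stepA_eq d path
  rw [hstep]
  have hnodup : (l.foldl (fun d path => d.modify (pvCategory path) [] (· ++ [path])) pvInitCats).keys.Nodup := by
    rw [pv_loop_keys]; decide
  rw [PySem.Dict.items_eq_map_keys _ hnodup ([] : List String), pv_loop_keys]
  congr 1
  apply List.map_congr_left
  intro c _
  rw [pv_loop_getD]
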